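-- pv_equiv track=rewrite | github.com/alicjarozycka/bwt | inexact_match.py | c_array
-- ===== SOURCE A (Python) =====
-- def c_array(bwt):
--     c_array = {}
--     sorted_bwt = sorted(bwt)
--     sorted_bwt = sorted_bwt[1:]
--     starting_number = 0
--
--     for character in sorted_bwt:
--         if character not in c_array:
--             c_array[character] = starting_number
--         starting_number += 1
--
--     return c_array
-- ===== SOURCE B (Python) =====
-- def c_array(bwt):
--     # Count each character once (O(n)), then one pass over the sorted
--     # distinct characters with a running cumulative total.
--     counts = {}
--     for ch in bwt:
--         counts[ch] = counts.get(ch, 0) + 1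
--     res = {}
--     total = 0
--     for ch in sorted(counts):
--         if total == 0:
--             if counts[ch] > 1:
--                 res[ch] = 0
--         else:
--             res[ch] = total - 1
--         total += counts[ch]
--     return res
-- ===== Notes on version B (the rewrite author's own statement) =====
-- stated objective: faster
-- what changed: Instead of sorting the whole string and scanning every character of the sorted tail while tracking insertion indices, B counts occurrences in one pass, sorts only the distinct characters, and assigns each its cumulative-count offset (minus the one dropped minimum character).
import Mathlib
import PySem

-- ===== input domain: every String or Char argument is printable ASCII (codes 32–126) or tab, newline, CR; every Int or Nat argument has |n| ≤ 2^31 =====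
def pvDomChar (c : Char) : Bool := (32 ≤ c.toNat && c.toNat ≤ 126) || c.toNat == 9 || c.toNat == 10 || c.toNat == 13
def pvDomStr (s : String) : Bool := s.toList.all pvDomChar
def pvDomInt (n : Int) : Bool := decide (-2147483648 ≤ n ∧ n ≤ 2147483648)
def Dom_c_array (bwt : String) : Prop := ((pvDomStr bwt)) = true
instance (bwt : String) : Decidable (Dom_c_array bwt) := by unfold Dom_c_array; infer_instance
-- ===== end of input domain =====

-- B replaces A's insertion-order scan of the full sorted string by a counting
-- pass plus a cumulative sum over the sorted distinct characters (objective: faster).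

-- ===== PORT A =====
-- dict keys are single characters; the Char-keyed dict is converted to the
-- List (String × Int) convention at the return.
def c_array (bwt : String) : List (String × Int) :=
  let sorted_bwt := PySem.List.sorted bwt.toList (fun c => c) false
  let sorted_bwt := PySem.List.slice sorted_bwt (some 1) none
  let st := sorted_bwt.foldl
    (fun (acc : PySem.Dict Char Int × Int) character =>
      ((if acc.1.contains character then acc.1
        else acc.1.insert character acc.2),
       acc.2 + 1))
    (PySem.Dict.empty, 0)
  st.1.items.map (fun p => (p.1.toString, p.2))

-- ===== PORT B =====
def c_array_alt (bwt : String) : List (String × Int) :=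
  let counts := bwt.toList.foldl
    (fun (d : PySem.Dict Char Int) ch => d.insert ch (d.getD ch 0 + 1))
    PySem.Dict.empty
  let st := (PySem.List.sorted counts.keys (fun c => c) false).foldl
    (fun (acc : PySem.Dict Char Int × Int) ch =>
      ((if acc.2 == 0 then
          (if counts.getD ch 0 > 1 then acc.1.insert ch 0 else acc.1)
        else acc.1.insert ch (acc.2 - 1)),
       acc.2 + counts.getD ch 0))
    (PySem.Dict.empty, 0)
  st.1.items.map (fun p => (p.1.toString, p.2))

-- ===== PRECONDITION & SPEC =====
def Spec_c_array (bwt : String) (out : List (String × Int)) : Prop := out = c_array_alt bwt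
instance (bwt : String) (out : List (String × Int)) : Decidable (Spec_c_array bwt out) := by unfold Spec_c_array; infer_instance

-- ===== CLAIM (what is proved, stated in full; the proofs are below) =====
def Claim_equal_c_array : Prop := ∀ (bwt : String), Dom_c_array bwt → Spec_c_array bwt (c_array bwt)

-- ===== LEMMAS AND PROOFS =====

def stepA (acc : PySem.Dict Char Int × Int) (character : Char) : PySem.Dict Char Int × Int :=
  ((if acc.1.contains character then acc.1 else acc.1.insert character acc.2), acc.2 + 1)

def stepB (l : List Char) (acc : PySem.Dict Char Int × Int) (ch : Char) : PySem.Dict Char Int × Int :=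
  ((if acc.2 == 0 then
      (if (PySem.Dict.counter l).getD ch 0 > 1 then acc.1.insert ch 0 else acc.1)
    else acc.1.insert ch (acc.2 - 1)),
   acc.2 + (PySem.Dict.counter l).getD ch 0)

def flatRep (l ds : List Char) : List Char := ds.flatMap (fun x => List.replicate (l.count x) x)

theorem repA_skip (k : Nat) (c : Char) (d : PySem.Dict Char Int) (n : Int)
    (h : d.contains c = true) :
    (List.replicate k c).foldl stepA (d, n) = (d, n + k) := by
  induction k generalizing n with
  | zero => simp
  | succ k ih =>
    rw [List.replicate_succ, List.foldl_cons]
    show (List.replicate k c).foldl stepA (if d.contains c then d else d.insert c n, n + 1) = _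
    rw [if_pos h, ih (n + 1)]
    have : n + 1 + (k:Int) = n + ((k:Nat)+1 : Nat) := by push_cast; ring
    rw [this]

theorem repA (k : Nat) (c : Char) (d : PySem.Dict Char Int) (n : Int)
    (h : d.contains c = false) (hk : 0 < k) :
    (List.replicate k c).foldl stepA (d, n) = (d.insert c n, n + k) := by
  obtain ⟨k', rfl⟩ : ∃ k', k = k' + 1 := ⟨k - 1, by omega⟩
  rw [List.replicate_succ, List.foldl_cons]
  show (List.replicate k' c).foldl stepA (if d.contains c then d else d.insert c n, n + 1) = _
  rw [if_neg (by simp [h]), repA_skip k' c _ (n+1) (PySem.Dict.contains_insert_self d c n)]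
  have : n + 1 + (k':Int) = n + ((k':Nat)+1 : Nat) := by push_cast; ring
  rw [this]

theorem mainLoop (l : List Char) (ds : List Char) (d : PySem.Dict Char Int) (total : Int)
    (hnd : ds.Nodup) (hc : ∀ x ∈ ds, d.contains x = false)
    (hpos : ∀ x ∈ ds, 0 < l.count x) (ht : 1 ≤ total) :
    (flatRep l ds).foldl stepA (d, total - 1)
      = ((ds.foldl (stepB l) (d, total)).1, (ds.foldl (stepB l) (d, total)).2 - 1) := by
  induction ds generalizing d total with
  | nil => simp [flatRep]
  | cons c rest ih =>
    rw [List.foldl_cons]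
    show (flatRep l (c :: rest)).foldl stepA (d, total - 1)
      = ((rest.foldl (stepB l) (stepB l (d, total) c)).1, (rest.foldl (stepB l) (stepB l (d, total) c)).2 - 1)
    have hcnt : (PySem.Dict.counter l).getD c 0 = (l.count c : Int) := PySem.Dict.getD_counter l c
    have hstep : stepB l (d, total) c = (d.insert c (total - 1), total + l.count c) := by
      simp only [stepB, hcnt]
      have : (total == 0) = false := by simp; omega
      rw [this]; simp
    rw [hstep]
    have hflat : flatRep l (c :: rest) = List.replicate (l.count c) c ++ flatRep l rest := by
      simp [flatRep]
    rw [hflat, List.foldl_append,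
        repA (l.count c) c d (total - 1) (hc c (by simp)) (hpos c (by simp))]
    have harith : total - 1 + (l.count c : Int) = (total + l.count c) - 1 := by ring
    rw [harith]
    exact ih (d.insert c (total - 1)) (total + l.count c) hnd.of_cons
      (fun x hx => by
        rw [PySem.Dict.contains_insert]
        have hne : x ≠ c := by rintro rfl; exact (List.nodup_cons.mp hnd).1 hx
        simp [hne, hc x (List.mem_cons_of_mem _ hx)])
      (fun x hx => hpos x (List.mem_cons_of_mem _ hx))
      (by have := hpos c (by simp); omega)

theorem flatRep_count (l ds : List Char) (hnd : ds.Nodup) (y : Char) :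
    (flatRep l ds).count y = if y ∈ ds then l.count y else 0 := by
  induction ds with
  | nil => simp [flatRep]
  | cons c rest ih =>
    have : flatRep l (c :: rest) = List.replicate (l.count c) c ++ flatRep l rest := by
      simp [flatRep]
    rw [this, List.count_append, List.count_replicate, ih hnd.of_cons]
    by_cases hyc : y = c
    · subst hyc
      simp [(List.nodup_cons.mp hnd).1]
    · simp [hyc, Ne.symm hyc]

theorem flatRep_perm (l ds : List Char) (hnd : ds.Nodup)
    (hmem : ∀ y, y ∈ ds ↔ y ∈ l) : (flatRep l ds).Perm l := by
  rw [List.perm_iff_count]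
  intro y
  rw [flatRep_count l ds hnd y]
  by_cases hy : y ∈ ds
  · simp [hy]
  · simp [hy]
    exact (List.count_eq_zero.mpr (fun h => hy ((hmem y).mpr h))).symm

theorem flatRep_pairwise (l ds : List Char) (hpw : ds.Pairwise (· < ·)) :
    (flatRep l ds).Pairwise (· ≤ ·) := by
  induction ds with
  | nil => simp [flatRep]
  | cons c rest ih =>
    have hrw : flatRep l (c :: rest) = List.replicate (l.count c) c ++ flatRep l rest := by
      simp [flatRep]
    rw [hrw, List.pairwise_append]
    refine ⟨List.pairwise_replicate_of_refl, ih (List.pairwise_cons.mp hpw).2, ?_⟩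
    intro a ha b hb
    have hac : a = c := List.eq_of_mem_replicate ha
    obtain ⟨x, hx, hbx⟩ := List.mem_flatMap.mp hb
    have hbx' : b = x := List.eq_of_mem_replicate hbx
    rw [hac, hbx']
    exact le_of_lt ((List.pairwise_cons.mp hpw).1 x hx)

theorem assemble (bwt : String) : c_array bwt = c_array_alt bwt := by
  set l := bwt.toList with hl
  set ds := PySem.List.sorted (PySem.Set.ofList l) (fun c => c) false with hds
  have hpw : ds.Pairwise (· < ·) := PySem.List.sorted_ofList_pairwise_lt l
  have hnd : ds.Nodup := hpw.imp ne_of_lt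
  have hmem : ∀ y, y ∈ ds ↔ y ∈ l := by
    intro y
    rw [hds, PySem.List.mem_sorted, PySem.Set.mem_ofList]
  have hsorted : PySem.List.sorted l (fun c => c) false = flatRep l ds :=
    PySem.List.sorted_id_eq_of_perm_of_pairwise _ _ (flatRep_perm l ds hnd hmem)
      (flatRep_pairwise l ds hpw)
  have hA : c_array bwt
      = (((flatRep l ds).tail).foldl stepA (PySem.Dict.empty, 0)).1.items.map
          (fun p => (p.1.toString, p.2)) := by
    show (((PySem.List.slice (PySem.List.sorted l (fun c => c) false) (some 1) none)).foldl stepA (PySem.Dict.empty, 0)).1.items.map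
          (fun p => (p.1.toString, p.2)) = _
    rw [PySem.List.slice_from_one, hsorted]
  have hB : c_array_alt bwt
      = ((ds.foldl (stepB l) (PySem.Dict.empty, 0)).1).items.map
          (fun p => (p.1.toString, p.2)) := by
    show (((PySem.List.sorted (PySem.Dict.counter l).keys (fun c => c) false)).foldl (stepB l) (PySem.Dict.empty, 0)).1.items.map
          (fun p => (p.1.toString, p.2)) = _
    rw [PySem.Dict.keys_counter]
  rw [hA, hB]
  rcases hcase : ds with _ | ⟨c, rest⟩
  · simp [flatRep]
  · rw [hcase] at hnd hmem
    have hcpos : 0 < l.count c := List.count_pos_iff.mpr ((hmem c).mp (by simp))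
    have hflat : flatRep l (c :: rest) = List.replicate (l.count c) c ++ flatRep l rest := by
      simp [flatRep]
    have hrep : List.replicate (l.count c) c = c :: List.replicate (l.count c - 1) c := by
      conv_lhs => rw [show l.count c = (l.count c - 1) + 1 by omega, List.replicate_succ]
    have htail : (flatRep l (c :: rest)).tail = List.replicate (l.count c - 1) c ++ flatRep l rest := by
      rw [hflat, hrep]; rfl
    have hcnt : (PySem.Dict.counter l).getD c 0 = (l.count c : Int) := PySem.Dict.getD_counter l c
    have hB1 : stepB l (PySem.Dict.empty, 0) c
        = ((if (l.count c : Int) > 1 then (PySem.Dict.empty : PySem.Dict Char Int).insert c 0 else PySem.Dict.empty), (l.count c : Int)) := by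
      simp [stepB, hcnt]
    have hcontains : ∀ x ∈ rest,
        ((if (l.count c : Int) > 1 then (PySem.Dict.empty : PySem.Dict Char Int).insert c 0 else PySem.Dict.empty)).contains x = false := by
      intro x hx
      have hne : x ≠ c := by rintro rfl; exact (List.nodup_cons.mp hnd).1 hx
      split
      · rw [PySem.Dict.contains_insert]; simp [hne]
      · simp
    have hmain := mainLoop l rest
        (if (l.count c : Int) > 1 then (PySem.Dict.empty : PySem.Dict Char Int).insert c 0 else PySem.Dict.empty)
        (l.count c) hnd.of_cons hcontains
        (fun x hx => List.count_pos_iff.mpr ((hmem x).mp (List.mem_cons_of_mem _ hx)))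
        (by exact_mod_cast hcpos)
    have hA1 : (List.replicate (l.count c - 1) c).foldl stepA ((PySem.Dict.empty : PySem.Dict Char Int), 0)
        = ((if (l.count c : Int) > 1 then (PySem.Dict.empty : PySem.Dict Char Int).insert c 0 else PySem.Dict.empty), (l.count c : Int) - 1) := by
      by_cases h1 : l.count c = 1
      · simp [h1]
      · have h2 : 1 < l.count c := by omega
        rw [repA (l.count c - 1) c _ 0 (by simp) (by omega)]
        rw [if_pos (by exact_mod_cast h2)]
        have : (0 : Int) + ((l.count c - 1 : Nat) : Int) = (l.count c : Int) - 1 := by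
          push_cast [Nat.cast_sub (by omega : 1 ≤ l.count c)]; ring
        rw [this]
    rw [htail, List.foldl_append, hA1, List.foldl_cons, hB1, hmain]

-- ===== VERDICT (by name: the statement is the Claim_ definition above) =====
theorem c_array_spec : Claim_equal_c_array := by
  intro bwt _
  exact assemble bwt
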